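-- pv_equiv track=rewrite | github.com/JamieDR/WIYS-Refactoring_2026 | python/transfer_to_tracker.py | extract_topic_summary
-- ===== SOURCE A (Python) =====
-- def extract_topic_summary(title, raw_input):
--     """Extract title + intro for Topic and Summary column"""
--     if not raw_input:
--         return f"TOPIC: {title}"
--
--     lines = raw_input.strip().split('\n')
--
--     in_intro = False
--     intro_lines = []
--     found_h1 = False
--
--     for line in lines:
--         if line.startswith('# ') and not line.startswith('## '):
--             found_h1 = True
--             continue
--
--         if found_h1:
--             if line.startswith('## '):
--                 if in_intro:
--                     break
--                 in_intro = True
--                 continue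
--             elif in_intro:
--                 if line.strip():
--                     intro_lines.append(line.strip())
--
--     intro = ' '.join(intro_lines).strip()
--
--     if intro:
--         return f"TOPIC: {title}\nSUMMARY: {intro}"
--     else:
--         return f"TOPIC: {title}"
-- ===== SOURCE B (Python) =====
-- def drop_until(xs, p):
--     """Suffix of xs starting at the first element satisfying p (empty if none)."""
--     for i, x in enumerate(xs):
--         if p(x):
--             return xs[i:]
--     return []
--
--
-- def take_until(xs, p):
--     """Prefix of xs up to (excluding) the first element satisfying p."""
--     for i, x in enumerate(xs):
--         if p(x):
--             return xs[:i]
--     return xs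
--
--
-- def extract_topic_summary(title, raw_input):
--     """Extract title + intro for Topic and Summary column"""
--     topic = f"TOPIC: {title}"
--     if not raw_input:
--         return topic
--
--     lines = raw_input.strip().split('\n')
--
--     def is_h1(l):
--         return l.startswith('# ') and not l.startswith('## ')
--
--     def is_h2(l):
--         return l.startswith('## ')
--
--     after_h1 = drop_until(lines, is_h1)
--     if not after_h1:
--         return topic
--     after_h2 = drop_until(after_h1[1:], is_h2)
--     if not after_h2:
--         return topic
--
--     block = take_until(after_h2[1:], is_h2)
--     parts = [l.strip() for l in block if l.strip() and not is_h1(l)]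
--
--     if parts:
--         return f"{topic}\nSUMMARY: {' '.join(parts)}"
--     return topic
-- ===== Notes on version B (the rewrite author's own statement) =====
-- stated objective: simpler
-- what changed: A's single pass with found_h1/in_intro flags and a break is replaced by three sequential scans (drop to the first H1, drop to the first H2 after it, take the block up to the next H2) followed by one filter-and-map comprehension over that block.
import Mathlib
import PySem

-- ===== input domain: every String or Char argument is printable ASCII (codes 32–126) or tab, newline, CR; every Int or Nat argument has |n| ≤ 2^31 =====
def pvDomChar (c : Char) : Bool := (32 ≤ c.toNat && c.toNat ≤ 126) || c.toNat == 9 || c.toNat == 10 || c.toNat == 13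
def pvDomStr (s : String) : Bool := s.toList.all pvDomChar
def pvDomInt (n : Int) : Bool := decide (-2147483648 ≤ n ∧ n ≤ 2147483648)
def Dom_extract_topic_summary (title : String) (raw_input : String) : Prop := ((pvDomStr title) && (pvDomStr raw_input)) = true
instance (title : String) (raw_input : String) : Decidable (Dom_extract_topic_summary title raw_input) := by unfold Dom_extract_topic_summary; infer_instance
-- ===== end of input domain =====

-- B replaces A's single flag-driven loop (found_h1/in_intro/break) by three sequential
-- scans — find the H1, find the first H2 after it, take the block up to the next H2 —
-- plus one filter-and-map comprehension; same cost, plainer decomposition.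

-- ===== PORT A =====
-- A's for-loop over the lines; state = (found_h1, in_intro, intro_lines); 'break' returns acc.
def pvLoopA : List String → Bool → Bool → List String → List String
  | [], _, _, acc => acc
  | l :: rest, found_h1, in_intro, acc =>
    if PySem.Str.startswith l "# " && !PySem.Str.startswith l "## " then
      pvLoopA rest true in_intro acc
    else if found_h1 then
      if PySem.Str.startswith l "## " then
        if in_intro then acc
        else pvLoopA rest found_h1 true acc
      else if in_intro then
        if PySem.Str.strip l ≠ "" then pvLoopA rest found_h1 in_intro (acc ++ [PySem.Str.strip l])
        else pvLoopA rest found_h1 in_intro acc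
      else pvLoopA rest found_h1 in_intro acc
    else pvLoopA rest found_h1 in_intro acc

def extract_topic_summary (title : String) (raw_input : String) : String :=
  if raw_input = "" then "TOPIC: " ++ title
  else
    let lines := (PySem.Str.split? (PySem.Str.strip raw_input) "\n").getD []
    let intro_lines := pvLoopA lines false false []
    let intro := PySem.Str.strip (PySem.Str.join " " intro_lines)
    if intro ≠ "" then "TOPIC: " ++ title ++ "\nSUMMARY: " ++ intro
    else "TOPIC: " ++ title

-- ===== PORT B =====
def pvIsH1 (l : String) : Bool := PySem.Str.startswith l "# " && !PySem.Str.startswith l "## "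
def pvIsH2 (l : String) : Bool := PySem.Str.startswith l "## "

-- Source B's drop_until: suffix starting at the first element satisfying p (empty if none)
def pvDropUntil (p : String → Bool) : List String → List String
  | [] => []
  | x :: xs => if p x then x :: xs else pvDropUntil p xs

-- Source B's take_until: prefix up to (excluding) the first element satisfying p
def pvTakeUntil (p : String → Bool) : List String → List String
  | [] => []
  | x :: xs => if p x then [] else x :: pvTakeUntil p xs

def extract_topic_summary_alt (title : String) (raw_input : String) : String :=
  let topic := "TOPIC: " ++ title
  if raw_input = "" then topic
  else
    let lines := (PySem.Str.split? (PySem.Str.strip raw_input) "\n").getD []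
    match pvDropUntil pvIsH1 lines with
    | [] => topic
    | _ :: rest1 =>
      match pvDropUntil pvIsH2 rest1 with
      | [] => topic
      | _ :: rest2 =>
        let parts := ((pvTakeUntil pvIsH2 rest2).filter
            (fun l => !(PySem.Str.strip l == "") && !pvIsH1 l)).map PySem.Str.strip
        if parts = [] then topic
        else topic ++ "\nSUMMARY: " ++ PySem.Str.join " " parts

-- ===== PRECONDITION & SPEC =====
def Spec_extract_topic_summary (title : String) (raw_input : String) (out : String) : Prop := out = extract_topic_summary_alt title raw_input
instance (title : String) (raw_input : String) (out : String) : Decidable (Spec_extract_topic_summary title raw_input out) := by unfold Spec_extract_topic_summary; infer_instance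

-- ===== CLAIM (what is proved, stated in full; the proofs are below) =====
def Claim_equal_extract_topic_summary : Prop := ∀ (title : String) (raw_input : String), Dom_extract_topic_summary title raw_input → Spec_extract_topic_summary title raw_input (extract_topic_summary title raw_input)

-- ===== LEMMAS AND PROOFS =====

-- Phase 0 of A's loop (found_h1 = false): it only scans for the first H1.
theorem loopA_phase0 (ls : List String) (ii : Bool) (acc : List String) :
    pvLoopA ls false ii acc =
      match pvDropUntil pvIsH1 ls with
      | [] => acc
      | _ :: r => pvLoopA r true ii acc := by
  induction ls with
  | nil => simp [pvLoopA, pvDropUntil]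
  | cons l rest ih =>
    by_cases ha : PySem.Chars.startswith l.toList ['#', ' '] = true
      <;> by_cases hb : PySem.Chars.startswith l.toList ['#', '#', ' '] = true
      <;> simp [pvLoopA, pvDropUntil, pvIsH1, ha, hb, ih]

-- Phase 1 (found_h1 = true, in_intro = false): it scans for the first H2.
theorem loopA_phase1 (ls : List String) (acc : List String) :
    pvLoopA ls true false acc =
      match pvDropUntil pvIsH2 ls with
      | [] => acc
      | _ :: r => pvLoopA r true true acc := by
  induction ls with
  | nil => simp [pvLoopA, pvDropUntil]
  | cons l rest ih =>
    by_cases ha : PySem.Chars.startswith l.toList ['#', ' '] = true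
      <;> by_cases hb : PySem.Chars.startswith l.toList ['#', '#', ' '] = true
      <;> simp [pvLoopA, pvDropUntil, pvIsH2, ha, hb, ih]

-- Phase 2 (found_h1 = in_intro = true): it collects exactly B's filtered block.
theorem loopA_phase2 (ls : List String) (acc : List String) :
    pvLoopA ls true true acc =
      acc ++ ((pvTakeUntil pvIsH2 ls).filter
        (fun l => !(PySem.Str.strip l == "") && !pvIsH1 l)).map PySem.Str.strip := by
  induction ls generalizing acc with
  | nil => simp [pvLoopA, pvTakeUntil]
  | cons l rest ih =>
    by_cases ha : PySem.Chars.startswith l.toList ['#', ' '] = true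
      <;> by_cases hb : PySem.Chars.startswith l.toList ['#', '#', ' '] = true
      <;> by_cases hs : PySem.Str.strip l = ""
      <;> simp [pvLoopA, pvTakeUntil, pvIsH1, pvIsH2, ha, hb, hs, ih]

-- the first element a dropWhile keeps fails the predicate
theorem dropWhile_head_false {alpha : Type} (p : alpha -> Bool) :
    forall (l : List alpha) (c : alpha) (zs : List alpha),
      List.dropWhile p l = c :: zs -> p c = false := by
  intro l
  induction l with
  | nil => intro c zs h; simp [List.dropWhile] at h
  | cons x xs ih =>
    intro c zs h
    rw [List.dropWhile_cons] at h
    by_cases hx : p x = true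
    · rw [if_pos hx] at h; exact ih c zs h
    · rw [if_neg hx] at h
      obtain ⟨rfl, rfl⟩ := List.cons.inj h
      simpa using hx

-- a nonempty stripped string starts with a non-space character
theorem strip_cons (w : List Char) (h : PySem.Chars.strip w ≠ []) :
    ∃ a as, PySem.Chars.strip w = a :: as ∧ PySem.Chars.isspace a = false := by
  obtain ⟨a, as, hc⟩ := List.exists_cons_of_ne_nil h
  refine ⟨a, as, hc, ?_⟩
  have hpre : PySem.Chars.strip w <+: PySem.Chars.lstrip w := by
    unfold PySem.Chars.strip PySem.Chars.rstrip
    have hsuf : List.dropWhile PySem.Chars.isspace (PySem.Chars.lstrip w).reverse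
        <:+ (PySem.Chars.lstrip w).reverse := List.dropWhile_suffix _
    have h2 := List.reverse_prefix.mpr hsuf
    simpa using h2
  obtain ⟨t, ht⟩ := hpre
  have hd : List.dropWhile PySem.Chars.isspace w = a :: (as ++ t) := by
    have h3 : PySem.Chars.lstrip w = a :: (as ++ t) := by rw [← ht, hc]; simp
    simpa [PySem.Chars.lstrip] using h3
  exact dropWhile_head_false _ w _ _ hd

-- a nonempty stripped string ends with a non-space character
theorem strip_concat (w : List Char) (h : PySem.Chars.strip w ≠ []) :
    ∃ m b, PySem.Chars.strip w = m ++ [b] ∧ PySem.Chars.isspace b = false := by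
  unfold PySem.Chars.strip PySem.Chars.rstrip at *
  cases hz : List.dropWhile PySem.Chars.isspace (PySem.Chars.lstrip w).reverse with
  | nil => rw [hz] at h; simp at h
  | cons c zs =>
    refine ⟨zs.reverse, c, ?_, dropWhile_head_false _ _ _ _ hz⟩
    simp

theorem lstrip_of_head {a : Char} (l : List Char) (h : PySem.Chars.isspace a = false) :
    PySem.Chars.lstrip (a :: l) = a :: l := by
  simp [PySem.Chars.lstrip, h]

theorem rstrip_of_last {c : Char} (l : List Char) (h : PySem.Chars.isspace c = false) :
    PySem.Chars.rstrip (l ++ [c]) = l ++ [c] := by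
  simp [PySem.Chars.rstrip, h]

-- the join starts with the first part
theorem join_starts (sep : List Char) (p : List Char) (rest : List (List Char)) :
    ∃ t, PySem.Chars.join sep (p :: rest) = p ++ t := by
  cases rest with
  | nil => exact ⟨[], by simp [PySem.Chars.join, List.intercalate]⟩
  | cons q r => exact ⟨sep ++ PySem.Chars.join sep (q :: r),
      by simp [PySem.Chars.join, List.intercalate]⟩

-- a list's getLast? is a member
theorem mem_of_getLast?' {alpha : Type} : ∀ (l : List alpha) (a : alpha),
    l.getLast? = some a → a ∈ l := by
  intro l
  induction l with
  | nil => simp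
  | cons x xs ih =>
    intro a h
    cases xs with
    | nil => simp at h; simp [h]
    | cons y ys =>
      rw [List.getLast?_cons_cons] at h
      exact List.mem_cons_of_mem _ (ih _ h)

-- the join ends with the last part
theorem join_ends (sep : List Char) (ps : List (List Char)) (h : ps ≠ []) :
    ∃ pre q, ps.getLast? = some q ∧ PySem.Chars.join sep ps = pre ++ q := by
  induction ps with
  | nil => simp at h
  | cons p rest ih =>
    cases rest with
    | nil => exact ⟨[], p, by simp, by simp [PySem.Chars.join, List.intercalate]⟩
    | cons q r =>
      obtain ⟨pre, q0, hq0, hpre⟩ := ih (by simp)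
      refine ⟨p ++ sep ++ pre, q0, by simpa using hq0, ?_⟩
      have hj : PySem.Chars.join sep (p :: q :: r) =
          p ++ sep ++ PySem.Chars.join sep (q :: r) := by
        simp [PySem.Chars.join, List.intercalate]
      rw [hj, hpre]
      simp

-- parts that are nonempty strip-results join to an already-stripped, nonempty string
theorem chars_strip_join (sep : List Char) (qs : List (List Char)) (hne : qs ≠ [])
    (hq : ∀ q ∈ qs, (∃ w, q = PySem.Chars.strip w) ∧ q ≠ []) :
    PySem.Chars.strip (PySem.Chars.join sep qs) = PySem.Chars.join sep qs ∧
    PySem.Chars.join sep qs ≠ [] := by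
  obtain ⟨p, rest, rfl⟩ := List.exists_cons_of_ne_nil hne
  obtain ⟨⟨w, hw⟩, hpne⟩ := hq p (by simp)
  obtain ⟨a, as, hpc0, hhead⟩ := strip_cons w (by rw [← hw]; exact hpne)
  have hpc : p = a :: as := by rw [hw, hpc0]
  obtain ⟨t, ht⟩ := join_starts sep p rest
  obtain ⟨pre, q0, hq0, hpre⟩ := join_ends sep (p :: rest) (by simp)
  have hlastmem := mem_of_getLast?' _ _ hq0
  obtain ⟨⟨w', hw'⟩, hqne⟩ := hq _ hlastmem
  obtain ⟨m, b, hmb, hb⟩ := strip_concat w' (by rw [← hw']; exact hqne)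
  have hlast : q0 = m ++ [b] := by rw [hw', hmb]
  have hJstart : PySem.Chars.join sep (p :: rest) = a :: (as ++ t) := by
    rw [ht, hpc]; simp
  have hJend : PySem.Chars.join sep (p :: rest) = (pre ++ m) ++ [b] := by
    rw [hpre, hlast, List.append_assoc]
  constructor
  · unfold PySem.Chars.strip
    have h1 : PySem.Chars.lstrip (PySem.Chars.join sep (p :: rest)) =
        PySem.Chars.join sep (p :: rest) := by
      rw [hJstart]; exact lstrip_of_head _ hhead
    have h2 : PySem.Chars.rstrip (PySem.Chars.join sep (p :: rest)) =
        PySem.Chars.join sep (p :: rest) := by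
      rw [hJend]; exact rstrip_of_last _ hb
    rw [h1, h2]
  · rw [hJstart]; simp

theorem strip_join_nil (sep : String) : PySem.Str.strip (PySem.Str.join sep []) = "" := by
  simp [PySem.Str.join, PySem.Str.strip, PySem.Chars.join, List.intercalate,
    PySem.Chars.strip, PySem.Chars.lstrip, PySem.Chars.rstrip]

theorem strip_join_parts (sep : String) (parts : List String) (hne : parts ≠ [])
    (hp : ∀ p ∈ parts, (∃ l, p = PySem.Str.strip l) ∧ p ≠ "") :
    PySem.Str.strip (PySem.Str.join sep parts) = PySem.Str.join sep parts ∧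
    PySem.Str.join sep parts ≠ "" := by
  have key := chars_strip_join sep.toList (parts.map String.toList)
    (by simpa using hne)
    (by
      intro q hq'
      simp only [List.mem_map] at hq'
      obtain ⟨p, hpmem, rfl⟩ := hq'
      obtain ⟨⟨l, hl⟩, hpne⟩ := hp p hpmem
      constructor
      · exact ⟨l.toList, by rw [hl]; simp [PySem.Str.strip]⟩
      · intro hcq
        apply hpne
        rw [← String.toList_inj]
        simpa using hcq)
  constructor
  · simp only [PySem.Str.join, PySem.Str.strip, String.toList_ofList]
    rw [key.1]
  · simp only [PySem.Str.join]
    intro hc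
    apply key.2
    rw [← String.toList_inj] at hc
    simpa using hc

-- the filtered-and-mapped parts satisfy the hypotheses of strip_join_parts
theorem parts_prop (block : List String) :
    ∀ p ∈ (block.filter (fun l => !(PySem.Str.strip l == "") && !pvIsH1 l)).map PySem.Str.strip,
      (∃ l, p = PySem.Str.strip l) ∧ p ≠ "" := by
  intro p hp
  simp only [List.mem_map, List.mem_filter, Bool.and_eq_true, Bool.not_eq_true',
    beq_eq_false_iff_ne, ne_eq] at hp
  obtain ⟨l, ⟨_, hne, _⟩, rfl⟩ := hp
  exact ⟨⟨l, rfl⟩, hne⟩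

-- ===== VERDICT (by name: the statement is the Claim_ definition above) =====
set_option maxHeartbeats 1000000 in
theorem extract_topic_summary_spec : Claim_equal_extract_topic_summary := by
  unfold Claim_equal_extract_topic_summary
  intro title raw_input _
  unfold Spec_extract_topic_summary extract_topic_summary extract_topic_summary_alt
  by_cases hraw : raw_input = ""
  · simp [hraw]
  · rw [if_neg hraw, if_neg hraw]
    simp only []
    generalize (PySem.Str.split? (PySem.Str.strip raw_input) "\n").getD [] = L
    rw [loopA_phase0]
    cases hd1 : pvDropUntil pvIsH1 L with
    | nil => simp [strip_join_nil]
    | cons x r1 =>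
      simp only []
      rw [loopA_phase1]
      cases hd2 : pvDropUntil pvIsH2 r1 with
      | nil => simp [strip_join_nil]
      | cons y r2 =>
        simp only []
        rw [loopA_phase2]
        simp only [List.nil_append]
        set parts := ((pvTakeUntil pvIsH2 r2).filter
          (fun l => !(PySem.Str.strip l == "") && !pvIsH1 l)).map PySem.Str.strip with hparts
        by_cases hpe : parts = []
        · simp [hpe, strip_join_nil]
        · obtain ⟨hfix, hjne⟩ := strip_join_parts " " parts hpe
            (hparts ▸ parts_prop (pvTakeUntil pvIsH2 r2))
          simp [hpe, hfix, hjne]
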